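-- pv_equiv track=rewrite | github.com/Global-X-ETFs/daily_pod_notifications | scripts/draft_flagged_emails.py | _get_pod
-- ===== SOURCE A (Python) =====
-- PODS = {
--     "vanessa": {
--         "display": "Vanessa",
--         "to": ["vyang@globalxetfs.com"],
--         "cc": ["btran@globalxetfs.com", "jqi@globalxetfs.com"],
--         "tickers": {
--             # Income
--             "SDIV","DIV","EFAS","SRET","ALTY","QDIV","PFFD","PFFV","SPFF",
--             "SDEM","FLOW","MLPA","MLPX","AUSF",
--             # Covered Call
--             "QYLD","XYLD","RYLD","QYLG","XYLG","DJIA","RYLG","DYLG","TYLG",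
--             "MLPD","EDGQ","EDGX",
--             # Options
--             "XRMI","XTR","XCLR","QRMI","QTR","QCLR",
--         },
--     },
--     "wayne_syon_nam": {
--         "display": "Wayne / Syon / Nam",
--         "to": [
--             "wxie@globalxetfs.com",
--             "nto@globalxetfs.com",
--             "sverma@globalxetfs.com",
--             "jwallick@globalxetfs.com",
--             "mkravchenko@globalxetfs.com",
--         ],
--         "cc": [],
--         "tickers": {
--             # Int'l Access (Wayne/Syon)
--             "GXG","ARGT",
--             # Thematic Disruptive
--             "AIQ","BKCH","BOTZ","BUG","CLOU","DRIV","FINX","HERO","SNSR",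
--             "SOCL","VPN","ZAP","GXDW","CHPX",
--             # Thematic Physical Environment
--             "AQWA","CTEC","HYDR","KROP","PAVE","RNRG","SHLD","CEFA","IPAV",
--             # Broadmarket
--             "CATH","KRMA","RSSL","FLAG","EGLE","GURU","CHRI","GXLC",
--             # Thematic People & Demo
--             "AGNG","EBIZ","EDOC","GNOM","MILN",
--             # Int'l Access (Nam)
--             "CHIQ","GREK","NORW","DAX","ASEA","VNAM","AUAU",
--             # Commodities
--             "LIT","URA","COPX","GOEX","DMAT","SIL","LNGX",
--         },
--     },
--     "sandy": {
--         "display": "Sandy",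
--         "to": ["slu@globalxetfs.com"],
--         "cc": ["czhao@globalxetfs.com", "kszeto@globalxetfs.com"],
--         "tickers": {
--             # Fixed Income
--             "ONOF","IRVH","CLIP","SLDR","MLDR","LLDR",
--             "ZCBA","ZCBB","ZCBC","ZCBE","ZCBF","ZCBG",
--             # Derivatives
--             "BITS","BTRN","BCCC","TLTX","COMD",
--             # Quant Solutions
--             "GXPT","GXPC","GXPD","GXPE","GXPS",
--             # Digital Assets
--             "BT0X GR","ET0X GR","LI0X GR","UNIX GR","AVMX GR",
--         },
--     },
-- }
--
-- _VANESSA_ALIASES = {"X FUNDS", "Q FUNDS"}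
--
-- def _get_pod(ticker: str):
--     t = str(ticker).strip().upper()
--     if t in _VANESSA_ALIASES:
--         return "vanessa"
--     for pod_name, pod in PODS.items():
--         if t in pod["tickers"]:
--             return pod_name
--     return None
-- ===== SOURCE B (Python) =====
-- # Compact CSV tables per pod; a reverse-lookup dict ticker -> pod is built once
-- # at module load by splitting them, so _get_pod is a single normalized dict lookup.
-- _POD_CSV = {
--     "vanessa": (
--         "SDIV,DIV,EFAS,SRET,ALTY,QDIV,PFFD,PFFV,SPFF,"
--         "SDEM,FLOW,MLPA,MLPX,AUSF,"
--         "QYLD,XYLD,RYLD,QYLG,XYLG,DJIA,RYLG,DYLG,TYLG,"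
--         "MLPD,EDGQ,EDGX,"
--         "XRMI,XTR,XCLR,QRMI,QTR,QCLR"
--     ),
--     "wayne_syon_nam": (
--         "GXG,ARGT,"
--         "AIQ,BKCH,BOTZ,BUG,CLOU,DRIV,FINX,HERO,SNSR,"
--         "SOCL,VPN,ZAP,GXDW,CHPX,"
--         "AQWA,CTEC,HYDR,KROP,PAVE,RNRG,SHLD,CEFA,IPAV,"
--         "CATH,KRMA,RSSL,FLAG,EGLE,GURU,CHRI,GXLC,"
--         "AGNG,EBIZ,EDOC,GNOM,MILN,"
--         "CHIQ,GREK,NORW,DAX,ASEA,VNAM,AUAU,"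
--         "LIT,URA,COPX,GOEX,DMAT,SIL,LNGX"
--     ),
--     "sandy": (
--         "ONOF,IRVH,CLIP,SLDR,MLDR,LLDR,"
--         "ZCBA,ZCBB,ZCBC,ZCBE,ZCBF,ZCBG,"
--         "BITS,BTRN,BCCC,TLTX,COMD,"
--         "GXPT,GXPC,GXPD,GXPE,GXPS,"
--         "BT0X GR,ET0X GR,LI0X GR,UNIX GR,AVMX GR"
--     ),
-- }
--
-- _INDEX = {"X FUNDS": "vanessa", "Q FUNDS": "vanessa"}
-- for _name, _csv in _POD_CSV.items():
--     for _tk in _csv.split(","):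
--         _INDEX[_tk] = _name
--
-- def _get_pod(ticker: str):
--     return _INDEX.get(str(ticker).strip().upper())
-- ===== Notes on version B (the rewrite author's own statement) =====
-- stated objective: alternative
-- what changed: Replaces the per-call scan over the PODS structure (alias-set test then a loop over pods testing set membership) with a reverse-lookup dict ticker->pod built once at module load by splitting compact CSV ticker tables; _get_pod becomes one normalized dict lookup.
import Mathlib
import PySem

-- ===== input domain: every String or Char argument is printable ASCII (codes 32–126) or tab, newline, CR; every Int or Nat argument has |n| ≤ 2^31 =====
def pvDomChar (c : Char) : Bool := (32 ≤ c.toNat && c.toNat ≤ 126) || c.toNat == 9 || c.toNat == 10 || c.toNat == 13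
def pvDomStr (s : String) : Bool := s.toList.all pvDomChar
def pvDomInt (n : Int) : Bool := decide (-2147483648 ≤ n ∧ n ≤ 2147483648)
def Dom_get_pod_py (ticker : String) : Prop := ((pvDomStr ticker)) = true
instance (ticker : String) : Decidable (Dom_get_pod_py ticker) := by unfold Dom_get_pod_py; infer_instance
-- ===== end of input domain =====

-- B replaces A's per-call scan over the pods with a reverse-lookup dict built once at module load
-- from compact CSV ticker tables (alternative data structure; one dict lookup per call).


-- ===== PORT A =====
-- PODS, keeping only what _get_pod reads (pod name and its tickers set), in insertion order
def pvPods : List (String × PySem.Set String) :=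
  [("vanessa", PySem.Set.ofList
      ["SDIV","DIV","EFAS","SRET","ALTY","QDIV","PFFD","PFFV","SPFF",
       "SDEM","FLOW","MLPA","MLPX","AUSF",
       "QYLD","XYLD","RYLD","QYLG","XYLG","DJIA","RYLG","DYLG","TYLG",
       "MLPD","EDGQ","EDGX",
       "XRMI","XTR","XCLR","QRMI","QTR","QCLR"]),
   ("wayne_syon_nam", PySem.Set.ofList
      ["GXG","ARGT",
       "AIQ","BKCH","BOTZ","BUG","CLOU","DRIV","FINX","HERO","SNSR",
       "SOCL","VPN","ZAP","GXDW","CHPX",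
       "AQWA","CTEC","HYDR","KROP","PAVE","RNRG","SHLD","CEFA","IPAV",
       "CATH","KRMA","RSSL","FLAG","EGLE","GURU","CHRI","GXLC",
       "AGNG","EBIZ","EDOC","GNOM","MILN",
       "CHIQ","GREK","NORW","DAX","ASEA","VNAM","AUAU",
       "LIT","URA","COPX","GOEX","DMAT","SIL","LNGX"]),
   ("sandy", PySem.Set.ofList
      ["ONOF","IRVH","CLIP","SLDR","MLDR","LLDR",
       "ZCBA","ZCBB","ZCBC","ZCBE","ZCBF","ZCBG",
       "BITS","BTRN","BCCC","TLTX","COMD",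
       "GXPT","GXPC","GXPD","GXPE","GXPS",
       "BT0X GR","ET0X GR","LI0X GR","UNIX GR","AVMX GR"])]

def pvVanessaAliases : PySem.Set String := PySem.Set.ofList ["X FUNDS", "Q FUNDS"]

-- the 'for pod_name, pod in PODS.items(): if t in pod["tickers"]: return pod_name' loop
def pvFindPod (t : String) : List (String × PySem.Set String) → Option String
  | [] => none
  | (name, tks) :: rest => if PySem.Set.contains tks t then some name else pvFindPod t rest

def get_pod_py (ticker : String) : Option String :=
  let t := PySem.Str.upper (PySem.Str.strip ticker)
  if PySem.Set.contains pvVanessaAliases t then some "vanessa"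
  else pvFindPod t pvPods

-- ===== PORT B =====
-- _POD_CSV: one comma-separated ticker table per pod
def pvPodCsv : List (String × String) :=
  [("vanessa",
    "SDIV,DIV,EFAS,SRET,ALTY,QDIV,PFFD,PFFV,SPFF,SDEM,FLOW,MLPA,MLPX,AUSF,QYLD,XYLD,RYLD,QYLG,XYLG,DJIA,RYLG,DYLG,TYLG,MLPD,EDGQ,EDGX,XRMI,XTR,XCLR,QRMI,QTR,QCLR"),
   ("wayne_syon_nam",
    "GXG,ARGT,AIQ,BKCH,BOTZ,BUG,CLOU,DRIV,FINX,HERO,SNSR,SOCL,VPN,ZAP,GXDW,CHPX,AQWA,CTEC,HYDR,KROP,PAVE,RNRG,SHLD,CEFA,IPAV,CATH,KRMA,RSSL,FLAG,EGLE,GURU,CHRI,GXLC,AGNG,EBIZ,EDOC,GNOM,MILN,CHIQ,GREK,NORW,DAX,ASEA,VNAM,AUAU,LIT,URA,COPX,GOEX,DMAT,SIL,LNGX"),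
   ("sandy",
    "ONOF,IRVH,CLIP,SLDR,MLDR,LLDR,ZCBA,ZCBB,ZCBC,ZCBE,ZCBF,ZCBG,BITS,BTRN,BCCC,TLTX,COMD,GXPT,GXPC,GXPD,GXPE,GXPS,BT0X GR,ET0X GR,LI0X GR,UNIX GR,AVMX GR")]

-- _INDEX: built once at module load — aliases first, then each pod's split CSV mapped to its name
def pvIndexB : PySem.Dict String String :=
  pvPodCsv.foldl
    (fun d p => ((PySem.Str.split? p.2 ",").getD []).foldl (fun d tk => d.insert tk p.1) d)
    (PySem.Dict.ofList [("X FUNDS", "vanessa"), ("Q FUNDS", "vanessa")])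

def get_pod_py_alt (ticker : String) : Option String :=
  pvIndexB.get? (PySem.Str.upper (PySem.Str.strip ticker))

-- ===== PRECONDITION & SPEC =====
def Spec_get_pod_py (ticker : String) (out : Option String) : Prop := out = get_pod_py_alt ticker
instance (ticker : String) (out : Option String) : Decidable (Spec_get_pod_py ticker out) := by unfold Spec_get_pod_py; infer_instance

-- ===== CLAIM (what is proved, stated in full; the proofs are below) =====
def Claim_equal_get_pod_py : Prop := ∀ (ticker : String), Dom_get_pod_py ticker → Spec_get_pod_py ticker (get_pod_py ticker)

-- ===== LEMMAS AND PROOFS =====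

-- proof-only shorthand: the i-th pod's ticker list
def pvTks (i : Nat) : List String := (pvPods.getD i ("", PySem.Set.ofList [])).2

-- B's index, evaluated: aliases first, then the three pods' ticker blocks (all keys distinct, so inserts append)
set_option maxRecDepth 100000 in
set_option maxHeartbeats 4000000 in
lemma pvIndexB_eq_mk :
    pvIndexB = PySem.Dict.mk
      (("X FUNDS", "vanessa") :: ("Q FUNDS", "vanessa") ::
        (((pvTks 0).map (fun x => (x, "vanessa"))
          ++ (pvTks 1).map (fun x => (x, "wayne_syon_nam"))
          ++ (pvTks 2).map (fun x => (x, "sandy"))))) := by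
  decide

-- looking up in a constant-valued block of the association list is membership in its key list
lemma pvGet_mk_map_const (l : List String) (v t : String) (rest : List (String × String)) :
    (PySem.Dict.mk ((l.map (fun x => (x, v))) ++ rest)).get? t
      = if t ∈ l then some v else (PySem.Dict.mk rest).get? t := by
  induction l with
  | nil => simp
  | cons x xs ih =>
    rw [List.map_cons, List.cons_append, PySem.Dict.get?_mk_cons]
    by_cases hx : x = t
    · simp [hx]
    · simp [hx, ih, Ne.symm hx]

-- the per-pod scan of A equals lookup in the three mapped blocks
lemma pvFindPod_eq (t : String) :
    pvFindPod t pvPods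
      = (PySem.Dict.mk
          ((pvTks 0).map (fun x => (x, "vanessa"))
           ++ (pvTks 1).map (fun x => (x, "wayne_syon_nam"))
           ++ (pvTks 2).map (fun x => (x, "sandy")))).get? t := by
  rw [List.append_assoc, pvGet_mk_map_const, pvGet_mk_map_const]
  rw [show ((pvTks 2).map (fun x => (x, "sandy")))
        = (pvTks 2).map (fun x => (x, "sandy")) ++ ([] : List (String × String))
      from (List.append_nil _).symm, pvGet_mk_map_const]
  simp [pvFindPod, pvPods, pvTks, PySem.Set.contains, PySem.Set.mem_ofList, PySem.Dict.get?]

theorem pvMain (ticker : String) : get_pod_py ticker = get_pod_py_alt ticker := by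
  simp only [get_pod_py, get_pod_py_alt]
  rw [pvIndexB_eq_mk, PySem.Dict.get?_mk_cons, PySem.Dict.get?_mk_cons, pvFindPod_eq]
  set t := PySem.Str.upper (PySem.Str.strip ticker) with ht
  by_cases h1 : t = "X FUNDS"
  · simp [pvVanessaAliases, PySem.Set.contains, h1]
  · by_cases h2 : t = "Q FUNDS"
    · simp [pvVanessaAliases, PySem.Set.contains, h2]
    · simp [pvVanessaAliases, PySem.Set.contains, h1, h2, Ne.symm h1, Ne.symm h2]

-- ===== VERDICT (by name: the statement is the Claim_ definition above) =====
theorem get_pod_py_spec : Claim_equal_get_pod_py := by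
  intro ticker _
  exact pvMain ticker
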